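-- pv_equiv track=rewrite | github.com/manav-saini/Cycle-accurate-simulator-for-5-stage-CPU | plot2.py | read_reg_and_mem_instructions
-- ===== SOURCE A (Python) =====
-- def read_reg_and_mem_instructions(frequency):
--     register_instructions = 0
--     memory_instructions = 0
--
--     for key, value in frequency.items():
--         if key == 'R' or key == 'SB' or key == 'U' or key == 'UJ':
--             register_instructions += value
--         else:
--             memory_instructions += value
--
--     total = register_instructions + memory_instructions
--
--     return register_instructions, memory_instructions, total
-- ===== SOURCE B (Python) =====
-- def read_reg_and_mem_instructions(frequency):
--     # Look up the four register keys directly instead of scanning-and-classifying.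
--     register_instructions = (frequency.get('R', 0) + frequency.get('SB', 0)
--                              + frequency.get('U', 0) + frequency.get('UJ', 0))
--     total = sum(frequency.values())
--     memory_instructions = total - register_instructions
--     return register_instructions, memory_instructions, total
-- ===== Notes on version B (the rewrite author's own statement) =====
-- stated objective: alternative
-- what changed: B never classifies entries: it reads the four register keys directly with dict.get (four O(1) lookups), sums all values once for the total, and derives the memory bucket as total - register; Pre_ excludes association lists with duplicate keys, which cannot represent a Python dict and on which first-match lookup is accidental.
import Mathlib
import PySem

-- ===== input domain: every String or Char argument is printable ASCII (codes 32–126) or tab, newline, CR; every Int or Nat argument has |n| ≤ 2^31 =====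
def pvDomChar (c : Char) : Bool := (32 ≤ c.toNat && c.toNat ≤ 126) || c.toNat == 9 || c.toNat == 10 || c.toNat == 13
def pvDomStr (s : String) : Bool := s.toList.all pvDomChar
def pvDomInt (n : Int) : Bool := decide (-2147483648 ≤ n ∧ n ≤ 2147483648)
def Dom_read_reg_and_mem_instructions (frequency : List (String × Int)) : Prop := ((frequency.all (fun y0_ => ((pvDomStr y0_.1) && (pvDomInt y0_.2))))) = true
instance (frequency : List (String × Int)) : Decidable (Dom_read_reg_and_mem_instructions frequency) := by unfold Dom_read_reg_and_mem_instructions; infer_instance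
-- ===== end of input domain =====

-- B reads the four register keys directly with dict.get and derives memory as total - register.
-- ===== PORT A =====
def read_reg_and_mem_instructions (frequency : List (String × Int)) : Int × Int × Int :=
  let p := frequency.foldl (fun (acc : Int × Int) kv =>
    if kv.1 == "R" || kv.1 == "SB" || kv.1 == "U" || kv.1 == "UJ" then
      (acc.1 + kv.2, acc.2)
    else
      (acc.1, acc.2 + kv.2)) (0, 0)
  let total := p.1 + p.2
  (p.1, p.2, total)

-- ===== PORT B =====
-- literal port of Python dict.get(k, 0): first match in the association list, default 0
def pvGet (l : List (String × Int)) (k : String) : Int :=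
  match l with
  | [] => 0
  | (k', v) :: t => if k' == k then v else pvGet t k

def read_reg_and_mem_instructions_alt (frequency : List (String × Int)) : Int × Int × Int :=
  let register_instructions := pvGet frequency "R" + pvGet frequency "SB"
    + pvGet frequency "U" + pvGet frequency "UJ"
  let total := (frequency.map (fun kv => kv.2)).sum
  let memory_instructions := total - register_instructions
  (register_instructions, memory_instructions, total)

-- ===== PRECONDITION & SPEC =====
-- Pre_ excludes association lists with duplicate keys: they cannot represent a Python dict
-- (the parameter is a dict), and first-match lookup order on them is accidental.
def Pre_read_reg_and_mem_instructions (frequency : List (String × Int)) : Prop :=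
  (frequency.map Prod.fst).Nodup
instance (frequency : List (String × Int)) : Decidable (Pre_read_reg_and_mem_instructions frequency) := by
  unfold Pre_read_reg_and_mem_instructions; infer_instance

def pvWitness_read_reg_and_mem_instructions : (List (String × Int)) :=
  [("R", 2), ("lw", 3), ("UJ", 1)]

def Spec_read_reg_and_mem_instructions (frequency : List (String × Int)) (out : Int × Int × Int) : Prop := out = read_reg_and_mem_instructions_alt frequency
instance (frequency : List (String × Int)) (out : Int × Int × Int) : Decidable (Spec_read_reg_and_mem_instructions frequency out) := by unfold Spec_read_reg_and_mem_instructions; infer_instance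

-- ===== CLAIM =====
def Claim_equal_read_reg_and_mem_instructions : Prop := ∀ (frequency : List (String × Int)), Dom_read_reg_and_mem_instructions frequency → Pre_read_reg_and_mem_instructions frequency → Spec_read_reg_and_mem_instructions frequency (read_reg_and_mem_instructions frequency)

-- ===== LEMMAS AND PROOFS =====

-- A's fold, from accumulator (a, b), adds the register-key sum to a and the rest to b.
lemma pv_fold_shift (l : List (String × Int)) (a b : Int) :
    l.foldl (fun (acc : Int × Int) kv =>
      if kv.1 == "R" || kv.1 == "SB" || kv.1 == "U" || kv.1 == "UJ" then
        (acc.1 + kv.2, acc.2)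
      else
        (acc.1, acc.2 + kv.2)) (a, b)
    = (a + ((l.filter (fun kv =>
          kv.1 == "R" || kv.1 == "SB" || kv.1 == "U" || kv.1 == "UJ")).map
        (fun kv => kv.2)).sum,
       b + ((l.map (fun kv => kv.2)).sum
        - ((l.filter (fun kv =>
          kv.1 == "R" || kv.1 == "SB" || kv.1 == "U" || kv.1 == "UJ")).map
        (fun kv => kv.2)).sum)) := by
  induction l generalizing a b with
  | nil => simp
  | cons h t ih =>
    simp only [List.foldl_cons, List.filter_cons, List.map_cons, List.sum_cons]
    by_cases hb : (h.1 == "R" || h.1 == "SB" || h.1 == "U" || h.1 == "UJ") = true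
    · simp only [hb, if_true, List.map_cons, List.sum_cons, ih]
      refine Prod.ext ?_ ?_ <;> simp <;> ring
    · simp only [Bool.not_eq_true] at hb
      simp only [hb, Bool.false_eq_true, if_false, ih]
      refine Prod.ext ?_ ?_ <;> simp <;> ring

-- Under nodup keys, first-match lookup equals the sum over entries with that key.
lemma pv_get_eq (l : List (String × Int)) (hn : (l.map Prod.fst).Nodup) (k : String) :
    pvGet l k = ((l.filter (fun kv => kv.1 == k)).map (fun kv => kv.2)).sum := by
  induction l with
  | nil => simp [pvGet]
  | cons h t ih =>
    simp only [List.map_cons, List.nodup_cons] at hn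
    obtain ⟨hnot, hnt⟩ := hn
    obtain ⟨k', v⟩ := h
    by_cases hk : k' = k
    · subst hk
      have hfil : t.filter (fun kv => kv.1 == k') = [] := by
        rw [List.filter_eq_nil_iff]
        intro kv hkv hbeq
        have hkv1 : kv.1 = k' := by simpa using hbeq
        refine hnot ?_
        have hm := List.mem_map_of_mem (f := Prod.fst) hkv
        rw [hkv1] at hm
        simpa using hm
      simp [pvGet, hfil]
    · simp [pvGet, hk, ih hnt]

-- The register-key sum splits into the four per-key sums.
lemma pv_filter_split (l : List (String × Int)) :
    ((l.filter (fun kv =>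
        kv.1 == "R" || kv.1 == "SB" || kv.1 == "U" || kv.1 == "UJ")).map
      (fun kv => kv.2)).sum
    = ((l.filter (fun kv => kv.1 == "R")).map (fun kv => kv.2)).sum
      + ((l.filter (fun kv => kv.1 == "SB")).map (fun kv => kv.2)).sum
      + ((l.filter (fun kv => kv.1 == "U")).map (fun kv => kv.2)).sum
      + ((l.filter (fun kv => kv.1 == "UJ")).map (fun kv => kv.2)).sum := by
  induction l with
  | nil => simp
  | cons h t ih =>
    simp only [List.filter_cons]
    by_cases h1 : h.1 = "R"
    · have h2 : h.1 ≠ "SB" := by simp [h1]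
      have h3 : h.1 ≠ "U" := by simp [h1]
      have h4 : h.1 ≠ "UJ" := by simp [h1]
      simp [h1, h2, h3, h4, ih]; ring
    · by_cases h2 : h.1 = "SB"
      · have h3 : h.1 ≠ "U" := by simp [h2]
        have h4 : h.1 ≠ "UJ" := by simp [h2]
        simp [h1, h2, h3, h4, ih]; ring
      · by_cases h3 : h.1 = "U"
        · have h4 : h.1 ≠ "UJ" := by simp [h3]
          simp [h1, h2, h3, h4, ih]; ring
        · by_cases h4 : h.1 = "UJ"
          · simp [h1, h2, h3, h4, ih]; ring
          · simp [h1, h2, h3, h4, ih]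

-- ===== VERDICT =====
theorem read_reg_and_mem_instructions_spec : Claim_equal_read_reg_and_mem_instructions := by
  intro frequency _ hpre
  unfold Spec_read_reg_and_mem_instructions read_reg_and_mem_instructions
    read_reg_and_mem_instructions_alt
  simp only [pv_fold_shift, pv_filter_split, pv_get_eq frequency hpre]
  exact Prod.ext (by simp) (by simp)
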